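-- pv_equiv track=rewrite | github.com/chrishokamp/qe_sequence_labeling | scripts/map_factor_corpus_to_subword_segmentation.py | map_factors
-- ===== SOURCE A (Python) =====
-- def map_factors(segmented_text, original_factors, segmentation_suffix=u'@@', factor_separator=u'|'):
--     """
--     Maps factors from the original segmentation into a new tag sequence
--     Where tags are split due to the segmentation, prepend B- and I- prefixes to indicate the
--       position of the factor in the segmentation
--
--     Params:
--       segmented_text: a string where some tokens may end with `segmentation_suffix`
--       original_factors: factors joined by `factor_separator`, corresponding to the tokens before segmentation
--       segmentation_suffix: the suffix used to indicate that a word was segmented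
--       factor_separator: the string used to separate factors in the factor corpus
--
--     Returns:
--       the mapped factor sequence
--     """
--
--     # assume whitespace tokenization
--     if type(segmented_text) is not list:
--         segmented_text = segmented_text.split()
--     if type(original_factors) is not list:
--         original_factors = original_factors.split()
--
--     mapped_factors = []
--     factor_idx = 0
--     replicating = False
--     for word in segmented_text:
--         current_factor = original_factors[factor_idx]
--         if word.endswith(segmentation_suffix):
--             each_factor = current_factor.split(factor_separator)
--             if replicating:
--                 new_factor = factor_separator.join([u'I-{}'.format(f) for f in each_factor])
--             else:
--                 new_factor = factor_separator.join([u'B-{}'.format(f) for f in each_factor])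
--             mapped_factors.append(new_factor)
--             replicating = True
--         else:
--             if replicating:
--                 each_factor = current_factor.split(factor_separator)
--                 new_factor = factor_separator.join([u'I-{}'.format(f) for f in each_factor])
--                 mapped_factors.append(new_factor)
--                 replicating = False
--             else:
--                 mapped_factors.append(current_factor)
--             factor_idx += 1
--     # If we're still replicating, we need to increment the index for the assertions below
--     if replicating:
--         factor_idx += 1
--
--     assert len(mapped_factors) == len(segmented_text), 'After mapping, we need one factor group per segmented token'
--     assert factor_idx == len(original_factors), 'We must cover all of the original factors'
--
--     return mapped_factors
-- ===== SOURCE B (Python) =====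
-- def map_factors(segmented_text, original_factors, segmentation_suffix=u'@@', factor_separator=u'|'):
--     """Group-based re-implementation: first split the segmented words into
--     groups (a run of suffix-ending words plus the closing word, or a trailing
--     run), then expand each group's factor at once."""
--     if type(segmented_text) is not list:
--         segmented_text = segmented_text.split()
--     if type(original_factors) is not list:
--         original_factors = original_factors.split()
--
--     groups = []
--     current = []
--     for word in segmented_text:
--         current.append(word)
--         if not word.endswith(segmentation_suffix):
--             groups.append(current)
--             current = []
--     if current:
--         groups.append(current)
--
--     assert len(groups) == len(original_factors), 'We must cover all of the original factors'
--
--     mapped_factors = []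
--     for group, factor in zip(groups, original_factors):
--         if len(group) == 1 and not group[0].endswith(segmentation_suffix):
--             mapped_factors.append(factor)
--         else:
--             pieces = factor.split(factor_separator)
--             mapped_factors.append(factor_separator.join(u'B-' + p for p in pieces))
--             for _ in group[1:]:
--                 mapped_factors.append(factor_separator.join(u'I-' + p for p in pieces))
--
--     assert len(mapped_factors) == len(segmented_text), 'After mapping, we need one factor group per segmented token'
--     return mapped_factors
-- ===== Notes on version B (the rewrite author's own statement) =====
-- stated objective: alternative
-- what changed: Replaces A's single word-by-word loop with replicating/factor_idx state by a two-phase decomposition: first build the groups of subword tokens, then expand each group's factor at once (unchanged for a lone unsegmented word, otherwise one B- form plus one I- form per extra token).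
import Mathlib
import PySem

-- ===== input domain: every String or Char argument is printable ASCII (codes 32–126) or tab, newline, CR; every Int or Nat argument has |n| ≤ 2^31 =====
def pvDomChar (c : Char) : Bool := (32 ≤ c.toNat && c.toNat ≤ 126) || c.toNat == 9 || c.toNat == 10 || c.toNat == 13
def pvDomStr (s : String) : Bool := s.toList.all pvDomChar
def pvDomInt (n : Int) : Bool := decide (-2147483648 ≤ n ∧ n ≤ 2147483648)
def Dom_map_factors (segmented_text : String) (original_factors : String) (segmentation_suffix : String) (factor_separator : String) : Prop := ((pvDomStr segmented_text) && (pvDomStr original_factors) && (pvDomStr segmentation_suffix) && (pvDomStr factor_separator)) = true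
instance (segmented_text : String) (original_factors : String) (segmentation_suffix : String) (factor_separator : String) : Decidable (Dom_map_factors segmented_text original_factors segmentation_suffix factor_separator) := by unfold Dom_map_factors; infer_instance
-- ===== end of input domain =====

-- B replaces A's single stateful word loop by a two-phase decomposition (build the subword groups, then expand each group's factor); same cost, proved equal on Pre_.

-- ===== PORT A =====
-- the for-loop of A: state (mapped_factors, factor_idx, replicating); none = Python raises (IndexError / ValueError)
def loopA (factors : List String) (suffix sep : String) :
    List String → List String → Nat → Bool → Option (List String × Nat × Bool)
  | [], mapped, idx, repl => some (mapped, idx, repl)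
  | w :: ws, mapped, idx, repl =>
    match PySem.List.pyGet? factors (idx : Int) with
    | none => none
    | some cf =>
      if PySem.Str.endswith w suffix then
        match PySem.Str.split? cf sep with
        | none => none
        | some parts =>
          let nf := if repl then PySem.Str.join sep (parts.map (fun f => "I-" ++ f))
            else PySem.Str.join sep (parts.map (fun f => "B-" ++ f))
          loopA factors suffix sep ws (mapped ++ [nf]) idx true
      else
        if repl then
          match PySem.Str.split? cf sep with
          | none => none
          | some parts =>
            loopA factors suffix sep ws
              (mapped ++ [PySem.Str.join sep (parts.map (fun f => "I-" ++ f))]) (idx + 1) false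
        else
          loopA factors suffix sep ws (mapped ++ [cf]) (idx + 1) repl

def map_factors (segmented_text : String) (original_factors : String) (segmentation_suffix : String) (factor_separator : String) : List String :=
  let words := PySem.Str.split₀ segmented_text
  let factors := PySem.Str.split₀ original_factors
  match loopA factors segmentation_suffix factor_separator words [] 0 false with
  | none => []        -- Python raises IndexError / ValueError here (excluded by Pre_)
  | some (mapped, fidx, repl) =>
    let fidx' := if repl then fidx + 1 else fidx
    -- the two asserts; an AssertionError (excluded by Pre_) is modelled as []
    if mapped.length = words.length then
      if fidx' = factors.length then mapped else []
    else []

-- ===== PORT B =====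
-- first phase of Source B: split the word list into groups
def altGroups (suffix : String) : List String → List String → List (List String)
  | [], cur => if cur.isEmpty then [] else [cur]
  | w :: ws, cur =>
    let cur' := cur ++ [w]
    if PySem.Str.endswith w suffix then altGroups suffix ws cur'
    else cur' :: altGroups suffix ws []

-- Source B's mapping-loop body for one (group, factor) pair; none = ''.split('') ValueError
def altGroupOut (suffix sep : String) (group : List String) (factor : String) : Option (List String) :=
  if group.length = 1 ∧ PySem.Str.endswith (group.headD "") suffix = false then some [factor]
  else
    match PySem.Str.split? factor sep with
    | none => none
    | some pieces =>
      some (PySem.Str.join sep (pieces.map (fun p => "B-" ++ p)) ::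
        (group.drop 1).map (fun _ => PySem.Str.join sep (pieces.map (fun p => "I-" ++ p))))

-- second phase of Source B: the mapping loop over zip(groups, original_factors)
def altEmitAll (suffix sep : String) : List (List String × String) → Option (List String)
  | [] => some []
  | (g, f) :: rest =>
    match altGroupOut suffix sep g f with
    | none => none
    | some out => (altEmitAll suffix sep rest).map (fun r => out ++ r)

def map_factors_alt (segmented_text : String) (original_factors : String) (segmentation_suffix : String) (factor_separator : String) : List String :=
  let words := PySem.Str.split₀ segmented_text
  let factors := PySem.Str.split₀ original_factors
  let groups := altGroups segmentation_suffix words []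
  if groups.length = factors.length then
    match altEmitAll segmentation_suffix factor_separator (groups.zip factors) with
    | none => []      -- ValueError (excluded by Pre_)
    | some m => if m.length = words.length then m else []
  else []             -- AssertionError (excluded by Pre_)

-- ===== PRECONDITION & SPEC =====
-- Pre_ = exactly the inputs on which Python A returns: the number of subword groups
-- (one per word not ending in the suffix, plus one for a trailing suffix-ending run)
-- must equal the number of factors (otherwise IndexError / AssertionError), and the
-- factor separator must be nonempty whenever some word ends with the suffix
-- (otherwise ''.split('') raises ValueError).
def Pre_map_factors (segmented_text : String) (original_factors : String) (segmentation_suffix : String) (factor_separator : String) : Prop :=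
  let words := PySem.Str.split₀ segmented_text
  let factors := PySem.Str.split₀ original_factors
  (words.countP (fun w => !PySem.Str.endswith w segmentation_suffix)
      + (if (words.getLast?.elim false (fun w => PySem.Str.endswith w segmentation_suffix)) then 1 else 0)
    = factors.length)
  ∧ (factor_separator ≠ "" ∨ words.all (fun w => !PySem.Str.endswith w segmentation_suffix) = true)
instance (segmented_text : String) (original_factors : String) (segmentation_suffix : String) (factor_separator : String) : Decidable (Pre_map_factors segmented_text original_factors segmentation_suffix factor_separator) := by unfold Pre_map_factors; infer_instance

def pvWitness_map_factors : String × String × String × String := ("a b@@ c", "x|1 y|2", "@@", "|")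

def Spec_map_factors (segmented_text : String) (original_factors : String) (segmentation_suffix : String) (factor_separator : String) (out : List String) : Prop := out = map_factors_alt segmented_text original_factors segmentation_suffix factor_separator
instance (segmented_text : String) (original_factors : String) (segmentation_suffix : String) (factor_separator : String) (out : List String) : Decidable (Spec_map_factors segmented_text original_factors segmentation_suffix factor_separator out) := by unfold Spec_map_factors; infer_instance

-- ===== CLAIM (what is proved, stated in full; the proofs are below) =====
def Claim_equal_map_factors : Prop := ∀ (segmented_text : String) (original_factors : String) (segmentation_suffix : String) (factor_separator : String), Dom_map_factors segmented_text original_factors segmentation_suffix factor_separator → Pre_map_factors segmented_text original_factors segmentation_suffix factor_separator → Spec_map_factors segmented_text original_factors segmentation_suffix factor_separator (map_factors segmented_text original_factors segmentation_suffix factor_separator)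

-- ===== LEMMAS AND PROOFS =====

-- A's loop with cons-style output (the accumulator of loopA removed)
def emitRaw (factors : List String) (suffix sep : String) :
    List String → Nat → Bool → Option (List String × Nat × Bool)
  | [], idx, repl => some ([], idx, repl)
  | w :: ws, idx, repl =>
    match PySem.List.pyGet? factors (idx : Int) with
    | none => none
    | some cf =>
      if PySem.Str.endswith w suffix then
        match PySem.Str.split? cf sep with
        | none => none
        | some parts =>
          let nf := if repl then PySem.Str.join sep (parts.map (fun f => "I-" ++ f))
            else PySem.Str.join sep (parts.map (fun f => "B-" ++ f))
          (emitRaw factors suffix sep ws idx true).map (fun p => (nf :: p.1, p.2))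
      else
        if repl then
          match PySem.Str.split? cf sep with
          | none => none
          | some parts =>
            (emitRaw factors suffix sep ws (idx + 1) false).map
              (fun p => (PySem.Str.join sep (parts.map (fun f => "I-" ++ f)) :: p.1, p.2))
        else
          (emitRaw factors suffix sep ws (idx + 1) repl).map (fun p => (cf :: p.1, p.2))

lemma loopA_eq_emitRaw (factors : List String) (suffix sep : String) :
    ∀ (ws mapped : List String) (idx : Nat) (repl : Bool),
    loopA factors suffix sep ws mapped idx repl
      = (emitRaw factors suffix sep ws idx repl).map (fun p => (mapped ++ p.1, p.2)) := by
  intro ws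
  induction ws with
  | nil => intro mapped idx repl; simp [loopA, emitRaw]
  | cons w ws ih =>
    intro mapped idx repl
    simp only [loopA, emitRaw]
    cases hg : PySem.List.pyGet? factors (idx : Int) with
    | none => rfl
    | some cf =>
      by_cases he : PySem.Str.endswith w suffix
      · simp only [he, if_pos]
        cases hs : PySem.Str.split? cf sep with
        | none => rfl
        | some parts =>
          simp only [ih, Option.map_map]; congr 1; funext p; simp
      · simp only [he, if_neg, Bool.false_eq_true, not_false_iff]
        by_cases hr : repl = true
        · subst hr
          simp only [if_pos]
          cases hs : PySem.Str.split? cf sep with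
          | none => rfl
          | some parts => simp only [ih, Option.map_map]; congr 1; funext p; simp
        · simp only [Bool.not_eq_true] at hr; subst hr
          simp only [Bool.false_eq_true, if_false, ih, Option.map_map]
          congr 1; funext p; simp

lemma emitRaw_length (factors : List String) (suffix sep : String) :
    ∀ (ws : List String) (idx : Nat) (repl : Bool) (out : List String) (i : Nat) (r : Bool),
    emitRaw factors suffix sep ws idx repl = some (out, i, r) → out.length = ws.length := by
  intro ws
  induction ws with
  | nil =>
    intro idx repl out i r h
    simp only [emitRaw, Option.some_inj] at h
    cases h
    rfl
  | cons w ws ih =>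
    intro idx repl out i r h
    simp only [emitRaw] at h
    split at h
    · exact absurd h (by simp)
    · split at h
      · split at h
        · exact absurd h (by simp)
        · obtain ⟨p, hp, he⟩ := Option.map_eq_some_iff.mp h
          obtain ⟨o1, i1, r1⟩ := p
          cases he
          simp [ih _ _ _ _ _ hp]
      · split at h
        · split at h
          · exact absurd h (by simp)
          · obtain ⟨p, hp, he⟩ := Option.map_eq_some_iff.mp h
            obtain ⟨o1, i1, r1⟩ := p
            cases he
            simp [ih _ _ _ _ _ hp]
        · obtain ⟨p, hp, he⟩ := Option.map_eq_some_iff.mp h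
          obtain ⟨o1, i1, r1⟩ := p
          cases he
          simp [ih _ _ _ _ _ hp]

-- B's group count equals the closed-form count used by Pre_
lemma altGroups_length (suffix : String) :
    ∀ (ws cur : List String),
    (altGroups suffix ws cur).length
      = ws.countP (fun w => !PySem.Str.endswith w suffix)
        + (if (ws.getLast?.elim (!cur.isEmpty) (fun w => PySem.Str.endswith w suffix)) then 1 else 0) := by
  intro ws
  induction ws with
  | nil =>
    intro cur
    cases cur <;> simp [altGroups]
  | cons w ws ih =>
    intro cur
    by_cases he : PySem.Str.endswith w suffix
    · have he' : PySem.Chars.endswith w.toList suffix.toList = true := by simpa using he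
      simp only [altGroups, he, if_pos]
      cases ws with
      | nil =>
        simp [altGroups, he', List.countP_cons, List.countP_nil, List.isEmpty_iff]
      | cons y ys =>
        rw [ih]
        obtain ⟨z, hz⟩ := Option.isSome_iff_exists.mp (List.getLast?_isSome.mpr (List.cons_ne_nil y ys))
        rw [List.getLast?_cons_cons, hz]
        by_cases hz2 : PySem.Chars.endswith z.toList suffix.toList = true <;>
          simp [List.countP_cons, he', hz2]
    · have he' : PySem.Chars.endswith w.toList suffix.toList = false := by simpa using he
      simp only [altGroups, he, if_neg, Bool.false_eq_true, not_false_iff, List.length_cons]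
      cases ws with
      | nil =>
        simp [altGroups, he', List.countP_cons, List.countP_nil]
      | cons y ys =>
        rw [ih]
        obtain ⟨z, hz⟩ := Option.isSome_iff_exists.mp (List.getLast?_isSome.mpr (List.cons_ne_nil y ys))
        rw [List.getLast?_cons_cons, hz]
        by_cases hz2 : PySem.Chars.endswith z.toList suffix.toList = true <;>
          simp [List.countP_cons, he', hz2] <;> omega

lemma split?_of_ne (s sep : String) (h : sep ≠ "") : ∃ parts, PySem.Str.split? s sep = some parts := by
  have h2 : sep.toList ≠ [] := by
    intro hx
    exact h (String.toList_eq_nil_iff.mp hx)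
  simp [PySem.Str.split?, PySem.Chars.split?, h2]

-- the first group produced from a nonempty current run starts with that run
lemma altGroups_cons_prefix (suffix : String) :
    ∀ (ws cur : List String), cur ≠ [] →
    ∃ g' gs, altGroups suffix ws cur = (cur ++ g') :: gs := by
  intro ws
  induction ws with
  | nil =>
    intro cur hc
    refine ⟨[], [], ?_⟩
    simp [altGroups, List.isEmpty_eq_false_iff.mpr hc]
  | cons w ws ih =>
    intro cur hc
    by_cases he : PySem.Str.endswith w suffix
    · obtain ⟨g', gs, hg⟩ := ih (cur ++ [w]) (by simp)
      refine ⟨w :: g', gs, ?_⟩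
      simp only [altGroups, he, if_pos]
      rw [hg]
      simp
    · refine ⟨[w], altGroups suffix ws [], ?_⟩
      simp only [altGroups]
      rw [if_neg he]

-- combined right-hand side of the main invariant: B's expansion of the remaining words,
-- from group state cur (the partially consumed current group) and factor index idx
def rhsOut (suffix sep : String) (factors ws cur : List String) (idx : Nat) : Option (List String) :=
  if cur.isEmpty then
    altEmitAll suffix sep ((altGroups suffix ws cur).zip (factors.drop idx))
  else
    match altGroups suffix ws cur, factors.drop idx with
    | g :: gs, cf :: fs =>
      match PySem.Str.split? cf sep with
      | none => none
      | some parts =>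
        (altEmitAll suffix sep (gs.zip fs)).map
          (fun rest =>
            (g.drop cur.length).map
              (fun _ => PySem.Str.join sep (parts.map (fun p => "I-" ++ p))) ++ rest)
    | _, _ => none

lemma altGroups_ne_nil (suffix : String) (ws cur : List String) (h : cur ≠ [] ∨ ws ≠ []) :
    altGroups suffix ws cur ≠ [] := by
  cases ws with
  | nil =>
    cases h with
    | inl hc => simp [altGroups, List.isEmpty_eq_false_iff.mpr hc]
    | inr hw => exact absurd rfl hw
  | cons w ws =>
    by_cases he : PySem.Str.endswith w suffix
    · obtain ⟨g', gs, hg⟩ := altGroups_cons_prefix suffix ws (cur ++ [w]) (by simp)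
      simp only [altGroups, he, if_pos]
      rw [hg]
      simp
    · simp only [altGroups]
      rw [if_neg he]
      simp

-- MAIN INVARIANT: A's loop from state (idx, replicating = cur ≠ []) produces exactly
-- B's group expansion of the remaining words and ends in a state passing both asserts
lemma main_inv (factors : List String) (suffix sep : String) :
    ∀ (ws cur : List String) (idx : Nat),
    (sep ≠ "" ∨ (cur = [] ∧ ws.all (fun w => !PySem.Str.endswith w suffix) = true)) →
    idx + (altGroups suffix ws cur).length = factors.length →
    ∃ out i r,
      emitRaw factors suffix sep ws idx (!cur.isEmpty) = some (out, i, r) ∧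
      (if r then i + 1 else i) = factors.length ∧
      rhsOut suffix sep factors ws cur idx = some out := by
  intro ws
  induction ws with
  | nil =>
    intro cur idx hsep h1
    cases cur with
    | nil =>
      refine ⟨[], idx, false, by simp [emitRaw], ?_, ?_⟩
      · simpa [altGroups] using h1
      · simp [rhsOut, altGroups, altEmitAll]
    | cons c cs =>
      have hsep' : sep ≠ "" := by
        rcases hsep with h | h
        · exact h
        · exact absurd h.1 (by simp)
      have h1' : idx + 1 = factors.length := by
        simpa [altGroups] using h1
      have hlen : idx < factors.length := by omega
      obtain ⟨parts, hs⟩ := split?_of_ne factors[idx] sep hsep'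
      refine ⟨[], idx, true, by simp [emitRaw], by simpa using h1', ?_⟩
      simp [rhsOut, altGroups, List.drop_eq_getElem_cons hlen, hs, altEmitAll,
        List.drop_of_length_le (show factors.length ≤ idx + 1 by omega), List.drop_length]
  | cons w ws ih =>
    intro cur idx hsep h1
    have hne : altGroups suffix (w :: ws) cur ≠ [] :=
      altGroups_ne_nil suffix (w :: ws) cur (Or.inr (by simp))
    have hlen : idx < factors.length := by
      rcases h : altGroups suffix (w :: ws) cur with _ | ⟨g, gs⟩
      · exact absurd h hne
      · rw [h] at h1; simp at h1; omega
    have hget : PySem.List.pyGet? factors (idx : Int) = some factors[idx] := by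
      rw [PySem.List.pyGet?_natCast]
      exact List.getElem?_eq_getElem hlen
    have hdrop : factors.drop idx = factors[idx] :: factors.drop (idx + 1) :=
      List.drop_eq_getElem_cons hlen
    by_cases he : PySem.Str.endswith w suffix
    · -- w ends with the suffix: the current group continues
      have hec : PySem.Chars.endswith w.toList suffix.toList = true := by simpa using he
      have hsep' : sep ≠ "" := by
        rcases hsep with h | h
        · exact h
        · exfalso
          have h2 := h.2
          simp [hec] at h2
      obtain ⟨parts, hs⟩ := split?_of_ne factors[idx] sep hsep'
      have hgroups : altGroups suffix (w :: ws) cur = altGroups suffix ws (cur ++ [w]) := by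
        simp only [altGroups, he, if_pos]
      obtain ⟨out', i, r, hE, hchk, hrhs⟩ :=
        ih (cur ++ [w]) idx (Or.inl hsep') (by rw [← hgroups]; exact h1)
      have hE' : emitRaw factors suffix sep ws idx true = some (out', i, r) := by
        rw [show (!(cur ++ [w]).isEmpty) = true by simp [List.isEmpty_iff]] at hE
        exact hE
      refine ⟨(if (!cur.isEmpty) then PySem.Str.join sep (parts.map (fun f => "I-" ++ f))
          else PySem.Str.join sep (parts.map (fun f => "B-" ++ f))) :: out', i, r, ?_, hchk, ?_⟩
      · simp only [emitRaw, hget, he, if_pos, hs]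
        rw [hE']
        rfl
      · cases cur with
        | nil =>
          obtain ⟨g', gs, hg⟩ := altGroups_cons_prefix suffix ws ([] ++ [w]) (by simp)
          rw [List.nil_append] at hg hrhs
          simp only [List.isEmpty_nil, Bool.not_true, Bool.false_eq_true, if_false]
          simp only [rhsOut, List.isEmpty_nil, if_pos, hgroups, List.nil_append, hg, hdrop,
            List.zip_cons_cons, altEmitAll]
          have hgo : altGroupOut suffix sep ([w] ++ g') factors[idx]
              = some (PySem.Str.join sep (parts.map (fun p => "B-" ++ p)) ::
                  g'.map (fun _ => PySem.Str.join sep (parts.map (fun p => "I-" ++ p)))) := by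
            simp only [altGroupOut]
            rw [if_neg (by simp [hec])]
            rw [hs]
            simp
          rw [hgo]
          simp only [rhsOut, List.isEmpty_cons, Bool.false_eq_true, if_false, hg, hdrop, hs] at hrhs
          obtain ⟨rest, hrest, hout'⟩ := Option.map_eq_some_iff.mp hrhs
          rw [hrest]
          simp only [Option.map_some]
          rw [← hout']
          simp
        | cons c cs =>
          obtain ⟨g2, gs2, hg2⟩ := altGroups_cons_prefix suffix ws ((c :: cs) ++ [w]) (by simp)
          simp only [List.isEmpty_cons, Bool.not_false, if_pos]
          simp only [rhsOut, List.isEmpty_cons, Bool.false_eq_true, if_false, hgroups, hg2,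
            hdrop, hs]
          have hcur : ((c :: cs) ++ [w]).isEmpty = false := by simp [List.isEmpty_iff]
          simp only [rhsOut, hcur, Bool.false_eq_true, if_false, hg2, hdrop, hs] at hrhs
          obtain ⟨rest, hrest, hout'⟩ := Option.map_eq_some_iff.mp hrhs
          rw [hrest]
          simp only [Option.map_some, Option.some_inj]
          rw [← hout']
          have hd1 : ((c :: cs) ++ [w] ++ g2).drop (c :: cs).length = [w] ++ g2 := by
            rw [List.append_assoc, List.drop_left]
          have hd2 : ((c :: cs) ++ [w] ++ g2).drop ((c :: cs) ++ [w]).length = g2 := by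
            rw [List.drop_left]
          rw [hd1, hd2]
          simp
    · -- w does not end with the suffix: the current group closes here
      have hec : PySem.Chars.endswith w.toList suffix.toList = false := by simpa using he
      have hgroups : altGroups suffix (w :: ws) cur = (cur ++ [w]) :: altGroups suffix ws [] := by
        simp only [altGroups]
        rw [if_neg he]
      have h1' : (idx + 1) + (altGroups suffix ws []).length = factors.length := by
        rw [hgroups] at h1
        simp at h1
        omega
      have hyp' : sep ≠ "" ∨ ([] = ([] : List String) ∧ ws.all (fun w => !PySem.Str.endswith w suffix) = true) := by
        rcases hsep with h | h
        · exact Or.inl h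
        · refine Or.inr ⟨rfl, ?_⟩
          have h2 := h.2
          simp only [List.all_cons, Bool.and_eq_true] at h2
          exact h2.2
      obtain ⟨out', i, r, hE, hchk, hrhs⟩ := ih [] (idx + 1) hyp' h1'
      have hE' : emitRaw factors suffix sep ws (idx + 1) false = some (out', i, r) := by
        simpa using hE
      have hrhs' : altEmitAll suffix sep ((altGroups suffix ws []).zip (factors.drop (idx + 1)))
          = some out' := by
        simpa [rhsOut] using hrhs
      cases cur with
      | nil =>
        refine ⟨factors[idx] :: out', i, r, ?_, hchk, ?_⟩
        · simp only [List.isEmpty_nil, Bool.not_true, emitRaw, hget]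
          rw [if_neg he]
          simp only [Bool.false_eq_true, if_false]
          rw [hE']
          rfl
        · simp only [rhsOut, List.isEmpty_nil, if_pos, hgroups, List.nil_append, hdrop,
            List.zip_cons_cons, altEmitAll]
          have hgo : altGroupOut suffix sep [w] factors[idx] = some [factors[idx]] := by
            simp [altGroupOut, hec]
          rw [hgo, hrhs']
          simp
      | cons c cs =>
        have hsep' : sep ≠ "" := by
          rcases hsep with h | h
          · exact h
          · exact absurd h.1 (by simp)
        obtain ⟨parts, hs⟩ := split?_of_ne factors[idx] sep hsep'
        refine ⟨PySem.Str.join sep (parts.map (fun f => "I-" ++ f)) :: out', i, r, ?_, hchk, ?_⟩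
        · simp only [List.isEmpty_cons, Bool.not_false, emitRaw, hget]
          rw [if_neg he]
          simp only [if_pos, hs]
          rw [hE']
          rfl
        · simp only [rhsOut, List.isEmpty_cons, Bool.false_eq_true, if_false, hgroups, hdrop, hs]
          rw [hrhs']
          simp only [Option.map_some, Option.some_inj]
          have hd : ((c :: cs) ++ [w]).drop (c :: cs).length = [w] := List.drop_left
          rw [hd]
          simp

-- ===== VERDICT (by name: the statement is the Claim_ definition above) =====
theorem map_factors_spec : Claim_equal_map_factors := by
  unfold Claim_equal_map_factors
  intro st of suf sep _hdom hpre
  unfold Pre_map_factors at hpre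
  obtain ⟨hcount, hsep⟩ := hpre
  unfold Spec_map_factors map_factors map_factors_alt
  dsimp only
  have hglen : (altGroups suf (PySem.Str.split₀ st) []).length = (PySem.Str.split₀ of).length := by
    rw [altGroups_length]
    simpa using hcount
  have hyp : sep ≠ "" ∨ (([] : List String) = [] ∧
      (PySem.Str.split₀ st).all (fun w => !PySem.Str.endswith w suf) = true) := by
    rcases hsep with h | h
    · exact Or.inl h
    · exact Or.inr ⟨rfl, h⟩
  obtain ⟨out, i, r, hE, hchk, hrhs⟩ :=
    main_inv (PySem.Str.split₀ of) suf sep (PySem.Str.split₀ st) [] 0 hyp (by simpa using hglen)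
  have hE' : emitRaw (PySem.Str.split₀ of) suf sep (PySem.Str.split₀ st) 0 false
      = some (out, i, r) := by simpa using hE
  have hout : altEmitAll suf sep
      ((altGroups suf (PySem.Str.split₀ st) []).zip (PySem.Str.split₀ of)) = some out := by
    simpa [rhsOut] using hrhs
  have hlen : out.length = (PySem.Str.split₀ st).length :=
    emitRaw_length _ _ _ _ _ _ _ _ _ hE'
  rw [loopA_eq_emitRaw, hE']
  simp only [Option.map_some, List.nil_append, hglen, if_pos, hout, hlen, hchk]
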